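-- pv_equiv track=rewrite | github.com/microsoft/PowerToys | PythonHome/Lib/site-packages/pip/vcs/subversion.py | find_tag_match
-- ===== SOURCE A (Python) =====
-- def find_tag_match(rev, tag_revs):
--     best_match_rev = None
--     best_tag = None
--     for tag, tag_rev in tag_revs:
--         if (tag_rev > rev and
--             (best_match_rev is None or best_match_rev > tag_rev)):
--             # FIXME: Is best_match > tag_rev really possible?
--             # or is it a sign something is wacky?
--             best_match_rev = tag_rev
--             best_tag = tag
--     return best_tag
-- ===== SOURCE B (Python) =====
-- def find_tag_match(rev, tag_revs):
--     # Sort-then-scan: stable sort by revision, then the first entry whose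
--     # revision exceeds rev is the answer (stability keeps A's first-wins ties).
--     for tag, tag_rev in sorted(tag_revs, key=lambda tr: tr[1]):
--         if tag_rev > rev:
--             return tag
--     return None
-- ===== Notes on version B (the rewrite author's own statement) =====
-- stated objective: alternative
-- what changed: Replaces A's fused single-pass best-so-far tracking loop by a sort-then-scan algorithm: stably sort the pairs by revision, then return the tag of the first entry whose revision exceeds rev (early exit); sort stability reproduces A's first-wins tie-breaking.
import Mathlib
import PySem

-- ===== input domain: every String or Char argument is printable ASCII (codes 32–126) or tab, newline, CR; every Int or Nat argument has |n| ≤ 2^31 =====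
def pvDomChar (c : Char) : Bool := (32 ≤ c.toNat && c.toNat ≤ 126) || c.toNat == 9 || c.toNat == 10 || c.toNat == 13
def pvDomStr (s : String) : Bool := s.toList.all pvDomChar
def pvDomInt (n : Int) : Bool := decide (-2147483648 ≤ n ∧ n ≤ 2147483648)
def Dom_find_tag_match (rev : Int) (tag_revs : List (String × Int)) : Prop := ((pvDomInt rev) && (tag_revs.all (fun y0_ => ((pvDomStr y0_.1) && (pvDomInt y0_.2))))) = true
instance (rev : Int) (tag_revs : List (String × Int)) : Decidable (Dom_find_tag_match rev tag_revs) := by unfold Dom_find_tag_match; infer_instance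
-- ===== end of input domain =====

-- B replaces A's fused best-so-far loop by sort-then-scan: stably sort by revision, take the first entry above rev.

-- ===== PORT A =====
-- the loop carries (best_match_rev, best_tag); branch condition in source order
def find_tag_match (rev : Int) (tag_revs : List (String × Int)) : Option String :=
  (tag_revs.foldl
    (fun (st : Option Int × Option String) x =>
      if (decide (x.2 > rev) &&
          (match st.1 with | none => true | some m => decide (m > x.2)))
      then (some x.2, some x.1) else st)
    (none, none)).2

-- ===== PORT B =====
-- sorted(tag_revs, key=revision), then the first entry with revision > rev (early-exit scan = find?)
def find_tag_match_alt (rev : Int) (tag_revs : List (String × Int)) : Option String :=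
  match (PySem.List.sorted tag_revs (fun tr => tr.2) false).find? (fun tr => decide (tr.2 > rev)) with
  | some p => some p.1
  | none => none

-- ===== PRECONDITION & SPEC =====
def Spec_find_tag_match (rev : Int) (tag_revs : List (String × Int)) (out : Option String) : Prop := out = find_tag_match_alt rev tag_revs
instance (rev : Int) (tag_revs : List (String × Int)) (out : Option String) : Decidable (Spec_find_tag_match rev tag_revs out) := by unfold Spec_find_tag_match; infer_instance

-- ===== CLAIM (what is proved, stated in full; the proofs are below) =====
def Claim_equal_find_tag_match : Prop := ∀ (rev : Int) (tag_revs : List (String × Int)), Dom_find_tag_match rev tag_revs → Spec_find_tag_match rev tag_revs (find_tag_match rev tag_revs)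

-- ===== LEMMAS AND PROOFS =====

-- A's loop state after any prefix is (r.map snd, r.map fst) where r is min? of the
-- carried-over best (o.toList) plus the filtered remaining elements
theorem find_tag_match_loop_inv (rev : Int) (l : List (String × Int)) (o : Option (String × Int)) :
    l.foldl
      (fun (st : Option Int × Option String) x =>
        if (decide (x.2 > rev) &&
            (match st.1 with | none => true | some m => decide (m > x.2)))
        then (some x.2, some x.1) else st)
      (o.map Prod.snd, o.map Prod.fst)
    = (let r := PySem.List.min? (o.toList ++ l.filter (fun p => decide (p.2 > rev)))
          (fun tr => tr.2)
       (r.map Prod.snd, r.map Prod.fst)) := by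
  induction l generalizing o with
  | nil => cases o <;> simp [PySem.List.min?]
  | cons x t ih =>
    simp only [List.foldl_cons, List.filter_cons]
    by_cases hx : x.2 > rev
    · cases o with
      | none =>
        have := ih (some x)
        simp only [Option.map_some, Option.toList_some, Option.toList_none,
          List.nil_append, List.singleton_append] at this ⊢
        simpa [hx] using this
      | some m =>
        by_cases hm : m.2 > x.2
        · have := ih (some x)
          simp only [Option.map_some, Option.toList_some, List.singleton_append] at this ⊢
          rw [show ((if (decide (x.2 > rev) &&
               (match (some m.2 : Option Int) with | none => true | some m => decide (m > x.2)))
              then (some x.2, some x.1) else (some m.2, some m.1)) : Option Int × Option String)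
              = (some x.2, some x.1) by simp [hx, hm]]
          rw [this]
          simp [PySem.List.min?, hx, show x.2 < m.2 from hm]
        · have := ih (some m)
          simp only [Option.map_some, Option.toList_some, List.singleton_append] at this ⊢
          rw [show ((if (decide (x.2 > rev) &&
               (match (some m.2 : Option Int) with | none => true | some m => decide (m > x.2)))
              then (some x.2, some x.1) else (some m.2, some m.1)) : Option Int × Option String)
              = (some m.2, some m.1) by simp [hx, hm]]
          rw [this]
          simp [PySem.List.min?, hx, show ¬ x.2 < m.2 from hm]
    · cases o with
      | none => simpa [hx] using ih none
      | some m => simpa [hx] using ih (some m)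

-- inserting x into a key-sorted list: the first entry above rev afterwards, in terms of before
theorem find_insertBy (rev : Int) (x : String × Int) (ys : List (String × Int))
    (hs : ys.Pairwise (fun a b => a.2 ≤ b.2)) :
    (PySem.List.insertBy (fun a b => decide (a.2 < b.2)) x ys).find? (fun tr => decide (tr.2 > rev))
    = match ys.find? (fun tr => decide (tr.2 > rev)), decide (x.2 > rev) with
      | none, true => some x
      | none, false => ys.find? (fun tr => decide (tr.2 > rev))
      | some m, true => if x.2 < m.2 then some x else some m
      | some m, false => some m := by
  induction ys with
  | nil =>
    by_cases hx : x.2 > rev <;> simp [PySem.List.insertBy, List.find?, hx]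
  | cons y t ih =>
    have hyt : ∀ z ∈ t, y.2 ≤ z.2 := (List.pairwise_cons.mp hs).1
    have hst : t.Pairwise (fun a b => a.2 ≤ b.2) := (List.pairwise_cons.mp hs).2
    by_cases hlt : x.2 < y.2
    · -- x goes in front
      rw [show PySem.List.insertBy (fun a b => decide (a.2 < b.2)) x (y :: t)
            = x :: y :: t by simp [PySem.List.insertBy, hlt]]
      by_cases hx : x.2 > rev
      · -- x satisfies the predicate, and its key is below any found m in y :: t
        cases hfind : (y :: t).find? (fun tr => decide (tr.2 > rev)) with
        | none => simp [List.find?_cons, hx, hfind]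
        | some m =>
          have hm : m ∈ y :: t := List.mem_of_find?_eq_some hfind
          have hym : y.2 ≤ m.2 := by
            rcases List.mem_cons.mp hm with h | h
            · simp [h]
            · exact hyt m h
          have hxm : x.2 < m.2 := lt_of_lt_of_le hlt hym
          simp [List.find?_cons, hx, hfind, hxm]
      · cases hfind : (y :: t).find? (fun tr => decide (tr.2 > rev)) <;>
          simp [List.find?_cons, hx, hfind]
    · -- x goes after y
      rw [show PySem.List.insertBy (fun a b => decide (a.2 < b.2)) x (y :: t)
            = y :: PySem.List.insertBy (fun a b => decide (a.2 < b.2)) x t by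
          simp [PySem.List.insertBy, hlt]]
      by_cases hy : y.2 > rev
      · -- y already satisfies the predicate, and ¬(x.2 < y.2) keeps it the winner
        by_cases hx : x.2 > rev <;> simp [List.find?_cons, hy, hlt, hx]
      · simp only [List.find?_cons, show (decide (y.2 > rev)) = false by simp [hy]]
        exact ih hst

-- sort-then-scan computes the first minimal entry of the filtered list
theorem find_sorted_eq_min_filter (rev : Int) (l : List (String × Int)) :
    (PySem.List.sorted l (fun tr => tr.2) false).find? (fun tr => decide (tr.2 > rev))
    = PySem.List.min? (l.filter (fun p => decide (p.2 > rev))) (fun tr => tr.2) := by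
  induction l using List.reverseRecOn with
  | nil => simp [PySem.List.sorted, PySem.List.min?]
  | append_singleton t x ih =>
    have hsorted_app : PySem.List.sorted (t ++ [x]) (fun tr => tr.2) false
        = PySem.List.insertBy (fun a b => decide (a.2 < b.2)) x
            (PySem.List.sorted t (fun tr => tr.2) false) := by
      rw [PySem.List.sorted_eq_foldl_insertBy, PySem.List.sorted_eq_foldl_insertBy,
        List.foldl_append, List.foldl_cons, List.foldl_nil]
    rw [hsorted_app,
      find_insertBy rev x _ (PySem.List.sorted_pairwise t (fun tr => tr.2)),
      ih, List.filter_append]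
    by_cases hx : x.2 > rev
    · cases hmin : PySem.List.min? (t.filter (fun p => decide (p.2 > rev))) (fun tr => tr.2) with
      | none =>
        have : t.filter (fun p => decide (p.2 > rev)) = [] :=
          (PySem.List.min?_eq_none_iff _ _).mp hmin
        simp [this, hx, PySem.List.min?, List.filter]
      | some m =>
        simp only [hx, decide_true]
        simp only [List.filter, hx, decide_true]
        unfold PySem.List.min? at hmin ⊢
        rw [List.foldl_append, hmin]
        simp
    · cases hmin : PySem.List.min? (t.filter (fun p => decide (p.2 > rev))) (fun tr => tr.2) <;>
        simp [List.filter, hx, hmin]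

-- ===== VERDICT (by name: the statement is the Claim_ definition above) =====
theorem find_tag_match_spec : Claim_equal_find_tag_match := by
  intro rev tag_revs _
  unfold Spec_find_tag_match find_tag_match find_tag_match_alt
  have h := find_tag_match_loop_inv rev tag_revs none
  simp only [Option.map_none, Option.toList_none, List.nil_append] at h
  rw [h, find_sorted_eq_min_filter rev tag_revs]
  cases hmin : PySem.List.min? (tag_revs.filter (fun p => decide (p.2 > rev))) (fun tr => tr.2) <;>
    simp only [Option.map_some, Option.map_none]
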